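-- pv_equiv track=rewrite | github.com/miethe/CCDash | backend/services/codebase_explorer.py | _sqlite_to_postgres
-- ===== SOURCE A (Python) =====
-- def _sqlite_to_postgres(query: str) -> str:
--     index = 0
--     out: list[str] = []
--     for ch in query:
--         if ch == "?":
--             index += 1
--             out.append(f"${index}")
--         else:
--             out.append(ch)
--     return "".join(out)
-- ===== SOURCE B (Python) =====
-- def _sqlite_to_postgres(query: str) -> str:
--     parts = query.split("?")
--     pieces = [parts[0]]
--     for i, seg in enumerate(parts[1:], 1):
--         pieces.append("$" + str(i) + seg)
--     return "".join(pieces)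
-- ===== Notes on version B (the rewrite author's own statement) =====
-- stated objective: faster
-- what changed: B splits the query at the placeholder characters into whole segments and rebuilds it by numbering the gaps, instead of A's per-character scan with a counter.
import Mathlib
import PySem

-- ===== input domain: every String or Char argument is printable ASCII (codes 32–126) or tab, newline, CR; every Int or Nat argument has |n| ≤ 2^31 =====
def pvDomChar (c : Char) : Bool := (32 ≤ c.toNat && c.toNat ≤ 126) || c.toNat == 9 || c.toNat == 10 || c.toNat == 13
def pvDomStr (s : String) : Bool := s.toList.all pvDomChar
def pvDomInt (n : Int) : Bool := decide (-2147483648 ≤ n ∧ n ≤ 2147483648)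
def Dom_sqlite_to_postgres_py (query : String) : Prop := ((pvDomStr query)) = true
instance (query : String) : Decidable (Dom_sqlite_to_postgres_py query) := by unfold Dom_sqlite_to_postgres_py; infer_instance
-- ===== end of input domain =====

-- B rebuilds the query from the segments between placeholders (query.split on the placeholder char), numbering the gaps,
-- instead of A's per-character scan with a running counter (objective: simpler).

-- ===== PORT A =====
-- the body of A's 'for ch in query' loop (state: (index, out))
def pvStepA (st : Int × List (List Char)) (ch : Char) : Int × List (List Char) :=
  if ch = '?' then (st.1 + 1, st.2 ++ [('$' :: PySem.Int.toChars (st.1 + 1))])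
  else (st.1, st.2 ++ [[ch]])

def sqlite_to_postgres_py (query : String) : String :=
  let r := query.toList.foldl pvStepA (0, [])
  String.ofList (PySem.Chars.join [] r.2)

-- ===== PORT B =====
-- parts = query.split("?"); pieces = [parts[0]] + ["$i" + seg for i, seg in enumerate(parts[1:], 1)]; "".join(pieces)
-- (split always returns a nonempty list, so parts[0] is headD)
def sqlite_to_postgres_py_alt (query : String) : String :=
  let parts := PySem.Chars.splitOn query.toList ['?']
  let pieces := (parts.headD []) ::
    (PySem.List.enumerate (parts.drop 1) 1).map
      (fun p => '$' :: (PySem.Int.toChars p.1 ++ p.2))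
  String.ofList (PySem.Chars.join [] pieces)

-- ===== PRECONDITION & SPEC =====
def Spec_sqlite_to_postgres_py (query : String) (out : String) : Prop := out = sqlite_to_postgres_py_alt query
instance (query : String) (out : String) : Decidable (Spec_sqlite_to_postgres_py query out) := by unfold Spec_sqlite_to_postgres_py; infer_instance

-- ===== CLAIM (what is proved, stated in full; the proofs are below) =====
def Claim_equal_sqlite_to_postgres_py : Prop := ∀ (query : String), Dom_sqlite_to_postgres_py query → Spec_sqlite_to_postgres_py query (sqlite_to_postgres_py query)

-- ===== LEMMAS AND PROOFS =====

-- reference: the translated query as a single list of chars, counter i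
def pvRef : List Char → Int → List Char
  | [], _ => []
  | c :: t, i =>
    if c = '?' then '$' :: (PySem.Int.toChars (i + 1) ++ pvRef t (i + 1))
    else c :: pvRef t i

-- clean structural recursion computing split on a single '?'
def pvSplit1 : List Char → List (List Char)
  | [] => [[]]
  | c :: t =>
    if c = '?' then [] :: pvSplit1 t
    else
      match pvSplit1 t with
      | [] => [[c]]
      | p :: ps => (c :: p) :: ps

def pvPre (pre : List Char) : List (List Char) → List (List Char)
  | [] => [pre]
  | p :: ps => (pre ++ p) :: ps

lemma pvSplit1_ne_nil (l : List Char) : pvSplit1 l ≠ [] := by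
  cases l with
  | nil => simp [pvSplit1]
  | cons c t =>
    simp only [pvSplit1]
    split
    · simp
    · cases h : pvSplit1 t <;> simp

lemma pvPre_nil (l : List (List Char)) (h : l ≠ []) : pvPre [] l = l := by
  cases l with
  | nil => exact absurd rfl h
  | cons p ps => simp [pvPre]

lemma join_nil_eq_flatten (ps : List (List Char)) : PySem.Chars.join [] ps = ps.flatten := by
  induction ps with
  | nil => simp [PySem.Chars.join, List.intercalate]
  | cons p ps ih =>
    cases ps with
    | nil => simp [PySem.Chars.join, List.intercalate]
    | cons q qs =>
      rw [PySem.Chars.join_cons_cons, ih]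
      simp

lemma go_eq (fuel : Nat) (l cur : List Char) (acc : List (List Char))
    (h : l.length < fuel) :
    PySem.Chars.splitOn.go ['?'] fuel l cur acc = acc.reverse ++ pvPre cur.reverse (pvSplit1 l) := by
  induction fuel generalizing l cur acc with
  | zero => omega
  | succ fuel ih =>
    cases l with
    | nil =>
      simp [PySem.Chars.splitOn.go, pvSplit1, pvPre]
    | cons c rest =>
      rw [PySem.Chars.splitOn.go]
      by_cases hc : c = '?'
      · subst hc
        have hp : List.isPrefixOf ['?'] ('?' :: rest) = true := by
          simp [List.isPrefixOf]
        simp only [hp, if_pos]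
        have : List.drop (List.length ['?']) ('?' :: rest) = rest := by simp
        rw [this, ih rest [] (cur.reverse :: acc) (by simpa using Nat.lt_of_succ_lt_succ h)]
        simp only [List.reverse_nil, List.reverse_cons]
        rw [pvPre_nil _ (pvSplit1_ne_nil rest)]
        simp [pvSplit1, pvPre]
      · have hp : List.isPrefixOf ['?'] (c :: rest) = false := by
          simp [List.isPrefixOf]
          intro hq; exact hc hq.symm
        simp only [hp, Bool.false_eq_true, if_false]
        rw [ih rest (c :: cur) acc (by simpa using Nat.lt_of_succ_lt_succ h)]
        simp only [pvSplit1, if_neg hc, List.reverse_cons]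
        cases hs : pvSplit1 rest with
        | nil => exact absurd hs (pvSplit1_ne_nil rest)
        | cons p ps => simp [pvPre]

lemma splitOn_eq (cs : List Char) : PySem.Chars.splitOn cs ['?'] = pvSplit1 cs := by
  unfold PySem.Chars.splitOn
  rw [go_eq cs.length.succ cs [] [] (Nat.lt_succ_self _)]
  simp [pvPre_nil _ (pvSplit1_ne_nil cs)]

-- A-side: the fold's output joined equals the reference
lemma aloop_eq (cs : List Char) (i : Int) (out : List (List Char)) :
    (cs.foldl pvStepA (i, out)).2.flatten = out.flatten ++ pvRef cs i := by
  induction cs generalizing i out with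
  | nil => simp [pvRef]
  | cons c t ih =>
    simp only [List.foldl_cons]
    by_cases hc : c = '?'
    · subst hc
      simp only [pvStepA]
      rw [ih]
      simp [pvRef]
    · simp only [pvStepA, if_neg hc]
      rw [ih]
      simp [pvRef, if_neg hc]

-- B-side: segments recombined with numbered gaps equal the reference
lemma bcombine_eq (cs : List Char) (i : Int) :
    (pvSplit1 cs).headD [] ++
      ((PySem.List.enumerate ((pvSplit1 cs).drop 1) (i + 1)).map
        (fun p => '$' :: (PySem.Int.toChars p.1 ++ p.2))).flatten = pvRef cs i := by
  induction cs generalizing i with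
  | nil => simp [pvSplit1, pvRef]
  | cons c t ih =>
    by_cases hc : c = '?'
    · subst hc
      have h1 : pvSplit1 ('?' :: t) = [] :: pvSplit1 t := by simp [pvSplit1]
      cases hs : pvSplit1 t with
      | nil => exact absurd hs (pvSplit1_ne_nil t)
      | cons p ps =>
        rw [h1, hs]
        simp only [List.headD_cons, List.drop_succ_cons, List.drop_zero]
        rw [PySem.List.enumerate_cons]
        simp only [List.map_cons, List.flatten_cons, List.nil_append]
        have := ih (i + 1)
        rw [hs] at this
        simp only [List.headD_cons, List.drop_succ_cons, List.drop_zero] at this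
        have h2 : pvRef ('?' :: t) i = '$' :: (PySem.Int.toChars (i + 1) ++ pvRef t (i + 1)) := by
          simp [pvRef]
        rw [h2, ← this]
        simp [List.append_assoc]
    · cases hs : pvSplit1 t with
      | nil => exact absurd hs (pvSplit1_ne_nil t)
      | cons p ps =>
        have h1 : pvSplit1 (c :: t) = (c :: p) :: ps := by simp [pvSplit1, if_neg hc, hs]
        rw [h1]
        simp only [List.headD_cons, List.drop_succ_cons, List.drop_zero, pvRef, if_neg hc]
        have := ih i
        rw [hs] at this
        simp only [List.headD_cons, List.drop_succ_cons, List.drop_zero] at this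
        rw [← this]
        simp

-- ===== VERDICT (by name: the statement is the Claim_ definition above) =====
theorem sqlite_to_postgres_py_spec : Claim_equal_sqlite_to_postgres_py := by
  intro query _
  unfold Spec_sqlite_to_postgres_py sqlite_to_postgres_py sqlite_to_postgres_py_alt
  simp only [join_nil_eq_flatten, splitOn_eq]
  rw [aloop_eq query.toList 0 []]
  simp only [List.flatten_nil, List.nil_append, List.flatten_cons]
  rw [← bcombine_eq query.toList 0]
  norm_num
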